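-- pv_equiv track=rewrite | github.com/Anupamvi/tradedesk | trade_playbook_pipeline.py | longest_streak
-- ===== SOURCE A (Python) =====
-- from typing import Dict, List, Optional
--
-- def longest_streak(flags: List[bool], target: bool) -> int:
--     best = 0
--     cur = 0
--     for f in flags:
--         if bool(f) == target:
--             cur += 1
--             if cur > best:
--                 best = cur
--         else:
--             cur = 0
--     return best
-- ===== SOURCE B (Python) =====
-- from itertools import groupby
--
--
-- def longest_streak(flags, target):
--     return max(
--         (sum(1 for _ in g) for k, g in groupby(flags, key=bool) if k == target),
--         default=0,
--     )
-- ===== Notes on version B (the rewrite author's own statement) =====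
-- stated objective: idiomatic
-- what changed: Replaced the manual running/best counter loop with an itertools.groupby decomposition: flags are split into maximal runs and the answer is the max length of runs whose key equals target (default 0).
import Mathlib
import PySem

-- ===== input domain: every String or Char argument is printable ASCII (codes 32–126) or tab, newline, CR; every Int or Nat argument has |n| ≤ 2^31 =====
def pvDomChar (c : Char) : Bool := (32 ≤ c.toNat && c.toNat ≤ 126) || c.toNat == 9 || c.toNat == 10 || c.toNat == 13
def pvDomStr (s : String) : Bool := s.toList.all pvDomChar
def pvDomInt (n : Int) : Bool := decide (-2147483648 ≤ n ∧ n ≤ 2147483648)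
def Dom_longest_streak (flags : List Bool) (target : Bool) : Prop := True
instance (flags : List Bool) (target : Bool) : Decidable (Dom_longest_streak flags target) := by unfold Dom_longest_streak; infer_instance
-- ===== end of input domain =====

-- B replaces A's manual running/best counter with a groupby decomposition (split into
-- maximal runs, take the max length among runs keyed by target); objective: idiomatic.

-- ===== PORT A =====
-- A's loop over flags keeping (best, cur), transcribed as a foldl over that pair.
def longest_streak (flags : List Bool) (target : Bool) : Int :=
  (flags.foldl
    (fun (s : Int × Int) f =>
      if f == target then
        let cur := s.2 + 1
        (if cur > s.1 then cur else s.1, cur)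
      else (s.1, 0))
    (0, 0)).1

-- ===== PORT B =====
-- itertools.groupby: split into maximal runs (key, length); length counted as in sum(1 for _ in g).
def pvGroups (l : List Bool) : List (Bool × Int) :=
  match l with
  | [] => []
  | x :: xs =>
    (x, 1 + (xs.takeWhile (· == x)).length) :: pvGroups (xs.dropWhile (· == x))
termination_by l.length
decreasing_by
  simp only [List.length_cons]
  exact Nat.lt_succ_of_le (List.length_dropWhile_le _ _)

-- max(..., default=0) over lengths of groups whose key equals target.
def longest_streak_alt (flags : List Bool) (target : Bool) : Int :=
  PySem.List.maxD (((pvGroups flags).filter (fun p => p.1 == target)).map (·.2)) id 0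

-- ===== PRECONDITION & SPEC =====
def Spec_longest_streak (flags : List Bool) (target : Bool) (out : Int) : Prop := out = longest_streak_alt flags target
instance (flags : List Bool) (target : Bool) (out : Int) : Decidable (Spec_longest_streak flags target out) := by unfold Spec_longest_streak; infer_instance

-- ===== CLAIM (what is proved, stated in full; the proofs are below) =====
def Claim_equal_longest_streak : Prop := ∀ (flags : List Bool) (target : Bool), Dom_longest_streak flags target → Spec_longest_streak flags target (longest_streak flags target)

-- ===== LEMMAS AND PROOFS =====

-- A's loop body, named for the lemmas.
def pvStep (target : Bool) (s : Int × Int) (f : Bool) : Int × Int :=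
  if f == target then
    let cur := s.2 + 1
    (if cur > s.1 then cur else s.1, cur)
  else (s.1, 0)

theorem pvRun_target (target : Bool) (r : List Bool) (h : ∀ x ∈ r, x = target) :
    ∀ best cur : Int, cur ≤ best → r.foldl (pvStep target) (best, cur) =
      (max best (cur + r.length), cur + r.length) := by
  induction r with
  | nil =>
    intro best cur hc
    simp only [List.foldl_nil, List.length_nil, Nat.cast_zero, add_zero]
    have : max best cur = best := by omega
    rw [this]
  | cons a r ih =>
    intro best cur hc
    have ha : a = target := h a (List.mem_cons_self ..)
    have h' : ∀ x ∈ r, x = target := fun x hx => h x (List.mem_cons_of_mem _ hx)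
    simp only [List.foldl_cons, pvStep, ha, beq_self_eq_true, if_true]
    have hmax : (if cur + 1 > best then cur + 1 else best) = max best (cur + 1) := by omega
    rw [hmax, ih h' _ _ (le_max_right _ _)]
    simp only [Prod.mk.injEq, List.length_cons]
    constructor <;> push_cast <;> omega

theorem pvRun_nontarget (target : Bool) (r : List Bool) (h : ∀ x ∈ r, x ≠ target) :
    ∀ best cur : Int, r ≠ [] → r.foldl (pvStep target) (best, cur) = (best, 0) := by
  induction r with
  | nil => intro _ _ hne; exact absurd rfl hne
  | cons a r ih =>
    intro best cur _
    have ha : (a == target) = false := by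
      simpa using h a (List.mem_cons_self ..)
    simp only [List.foldl_cons, pvStep, ha]
    simp only [Bool.false_eq_true, if_false]
    rcases r with _ | ⟨b, r⟩
    · simp
    · exact ih (fun x hx => h x (List.mem_cons_of_mem _ hx)) best 0 (by simp)

-- dropWhile's head does not satisfy the predicate.
theorem pvDropWhile_head (x : Bool) (xs : List Bool) {h : Bool} {t : List Bool}
    (he : xs.dropWhile (· == x) = h :: t) : h ≠ x := by
  have := List.head_dropWhile_not (p := (· == x)) (l := xs) (by simp [he])
  simpa [he] using this

-- The loop's best over l (entered with cur = 0, or with a non-target head) equals the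
-- group-wise fold over pvGroups l.
theorem pvMain (target : Bool) :
    ∀ n (l : List Bool), l.length ≤ n → ∀ best cur : Int, 0 ≤ best →
      (cur = 0 ∨ ∀ h ∈ l.head?, h ≠ target) →
      (l.foldl (pvStep target) (best, cur)).1 =
        ((pvGroups l).filter (fun p => p.1 == target)).foldl (fun m p => max m p.2) best := by
  intro n
  induction n with
  | zero =>
    intro l hl best cur _ _
    have : l = [] := List.eq_nil_of_length_eq_zero (Nat.le_zero.mp hl)
    simp [this, pvGroups]
  | succ n ih =>
    intro l hl best cur hbest hcur
    match l with
    | [] => simp [pvGroups]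
    | x :: xs =>
      have hsplit : x :: xs = (x :: xs.takeWhile (· == x)) ++ xs.dropWhile (· == x) := by
        simp [List.takeWhile_append_dropWhile]
      set run := xs.takeWhile (· == x) with hrun
      set rest := xs.dropWhile (· == x) with hrest
      have hrest_len : rest.length ≤ n := by
        have hd := List.length_dropWhile_le (p := (· == x)) (l := xs)
        rw [← hrest] at hd
        simp only [List.length_cons] at hl
        omega
      have hrest_head : ∀ h ∈ rest.head?, h ≠ x := by
        intro h hh
        rcases hre : rest with _ | ⟨a, t⟩
        · rw [hre] at hh; simp at hh
        · rw [hre] at hh; simp at hh; subst hh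
          exact pvDropWhile_head x xs (hrest.symm.trans hre).symm.symm
      have hrun_all : ∀ y ∈ x :: run, y = x := by
        intro y hy
        rcases List.mem_cons.mp hy with h | h
        · exact h
        · simpa using List.mem_takeWhile_imp h
      conv_lhs => rw [hsplit]
      rw [List.foldl_append]
      by_cases hx : x = target
      · subst hx
        have hcur0 : cur = 0 := by
          rcases hcur with h | h
          · exact h
          · exact absurd rfl (h x (by simp))
        subst hcur0
        rw [pvRun_target x _ hrun_all best 0 hbest]
        rw [ih rest hrest_len _ _ (le_trans hbest (le_max_left _ _)) (Or.inr hrest_head)]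
        conv_rhs => rw [pvGroups]
        rw [← hrun, ← hrest]
        simp only [List.filter_cons, beq_self_eq_true, if_true, List.foldl_cons]
        congr 1
        simp only [List.length_cons]
        push_cast
        omega
      · have hne : ∀ y ∈ x :: run, y ≠ target := fun y hy => by
          rw [hrun_all y hy]; exact hx
        rw [pvRun_nontarget target _ hne best cur (by simp)]
        rw [ih rest hrest_len _ _ hbest (Or.inl rfl)]
        conv_rhs => rw [pvGroups]
        rw [← hrun, ← hrest]
        have hxt : ((x, (1 : Int) + run.length).1 == target) = false := by
          simpa using hx
        simp [hxt]

-- max? with identity key, started on a nonempty list, folds like max.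
theorem pvMax?_fold (t : List Int) :
    ∀ m : Int, PySem.List.max? (m :: t) id = some (t.foldl max m) := by
  induction t with
  | nil => intro m; rfl
  | cons a t ih =>
    intro m
    have hstep : PySem.List.max? (m :: a :: t) id = PySem.List.max? (max m a :: t) id := by
      simp only [PySem.List.max?, List.foldl_cons]
      congr 1
      simp only [id]
      split_ifs <;> simp only [Option.some.injEq] <;> omega
    rw [hstep, ih]
    simp [List.foldl_cons]

-- maxD with default 0 over a list of positive ints equals foldl max 0.
theorem pvMaxD_eq (l : List Int) (h : ∀ x ∈ l, 0 < x) :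
    PySem.List.maxD l id 0 = l.foldl max 0 := by
  rcases l with _ | ⟨a, t⟩
  · rfl
  · simp only [PySem.List.maxD]
    rw [pvMax?_fold]
    simp only [Option.getD_some, List.foldl_cons]
    have ha : max 0 a = a := by
      have := h a (List.mem_cons_self ..)
      omega
    rw [ha]

-- every group recorded by pvGroups has positive length.
theorem pvGroups_pos : ∀ (l : List Bool) (p : Bool × Int), p ∈ pvGroups l → 0 < p.2 := by
  intro l
  induction l using pvGroups.induct with
  | case1 => intro p hp; simp [pvGroups] at hp
  | case2 x xs ih =>
    intro p hp
    rw [pvGroups] at hp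
    rcases List.mem_cons.mp hp with h | h
    · subst h; simp; positivity
    · exact ih p h

-- ===== VERDICT (by name: the statement is the Claim_ definition above) =====
theorem longest_streak_spec : Claim_equal_longest_streak := by
  intro flags target _
  show longest_streak flags target = longest_streak_alt flags target
  unfold longest_streak longest_streak_alt
  rw [pvMaxD_eq _ (by
    intro x hx
    rcases List.mem_map.mp hx with ⟨p, hp, hpe⟩
    subst hpe
    exact pvGroups_pos flags p (List.mem_filter.mp hp).1)]
  rw [List.foldl_map]
  exact pvMain target flags.length flags le_rfl 0 0 le_rfl (Or.inl rfl)
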